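-- pv_equiv track=rewrite | github.com/eugenekingfish/lms | py_src/linear_quivers.py | __remove_empties
-- ===== SOURCE A (Python) =====
-- def __remove_empties(L):
--     idx = len(L) - 1
--     non_empty_found = False
--
--     while idx >= 0:
--         if L[idx] == []:
--             if non_empty_found:
--                 L[idx] = []
--             else:
--                 L.pop()
--         else:
--             non_empty_found = True
--         idx -= 1
--     return L
-- ===== SOURCE B (Python) =====
-- def __remove_empties(L):
--     keep = 0
--     i = 0
--     for x in L:
--         i += 1
--         if x != []:
--             keep = i
--     del L[keep:]
--     return L
-- ===== Notes on version B (the rewrite author's own statement) =====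
-- stated objective: simpler
-- what changed: B does one forward pass recording the 1-based position of the last non-empty entry and then drops everything after it with a single bulk 'del L[keep:]', instead of A's backward scan with a found-flag, per-element pops and no-op reassignments.
import Mathlib
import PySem

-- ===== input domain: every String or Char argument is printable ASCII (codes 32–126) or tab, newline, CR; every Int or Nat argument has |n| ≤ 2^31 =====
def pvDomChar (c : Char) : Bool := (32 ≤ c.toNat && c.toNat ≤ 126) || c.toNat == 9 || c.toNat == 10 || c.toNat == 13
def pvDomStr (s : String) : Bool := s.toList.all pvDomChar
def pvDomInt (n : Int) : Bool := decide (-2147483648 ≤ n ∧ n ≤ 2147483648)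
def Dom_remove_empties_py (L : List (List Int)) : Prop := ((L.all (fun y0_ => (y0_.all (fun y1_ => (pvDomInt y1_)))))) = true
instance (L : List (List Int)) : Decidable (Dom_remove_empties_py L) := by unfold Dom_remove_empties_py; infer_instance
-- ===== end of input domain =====

-- B records the last non-empty position in one forward pass and drops the tail with one bulk
-- deletion, instead of A's backward flag-driven scan with per-element pops; both mutate L in
-- place and return it, and the equivalence proved here is about the return value.


-- ===== PORT A =====
-- A scans idx from len-1 down to 0 with a found-flag; 'L.pop()' removes the last
-- element (dropLast), and 'L[idx] = []' fires only when L[idx] == [] so it is a no-op.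
-- Indices are nonnegative and in range at every step, so plain getElem?.getD is exact here.
def pvALoop : Nat → List (List Int) → Bool → List (List Int)
  | 0, L, _ => L
  | n+1, L, found =>
    if L[n]?.getD [] = [] then
      if found then pvALoop n L found      -- L[idx] = []  (no-op reassignment)
      else pvALoop n L.dropLast found      -- L.pop()
    else pvALoop n L true

def remove_empties_py (L : List (List Int)) : List (List Int) :=
  pvALoop L.length L false

-- ===== PORT B =====
-- B: forward pass 'for x in L: i += 1; if x != []: keep = i', then 'del L[keep:]'.
def remove_empties_py_alt (L : List (List Int)) : List (List Int) :=
  L.take ((L.foldl (fun p x => ((p.1 + 1 : Nat), if x ≠ [] then p.1 + 1 else p.2)) (0, 0)).2)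

-- ===== PRECONDITION & SPEC =====
def Spec_remove_empties_py (L : List (List Int)) (out : List (List Int)) : Prop := out = remove_empties_py_alt L
instance (L : List (List Int)) (out : List (List Int)) : Decidable (Spec_remove_empties_py L out) := by unfold Spec_remove_empties_py; infer_instance

-- ===== CLAIM (what is proved, stated in full; the proofs are below) =====
def Claim_equal_remove_empties_py : Prop := ∀ (L : List (List Int)), Dom_remove_empties_py L → Spec_remove_empties_py L (remove_empties_py L)

-- ===== LEMMAS AND PROOFS =====

def pvKeepStep : Nat × Nat → List Int → Nat × Nat :=
  fun p x => ((p.1 + 1 : Nat), if x ≠ [] then p.1 + 1 else p.2)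

lemma pvKeepStep_eq : (fun (p : Nat × Nat) (x : List Int) => ((p.1 + 1 : Nat), if x ≠ [] then p.1 + 1 else p.2)) = pvKeepStep := rfl

lemma pvFold_fst (L : List (List Int)) (i k : Nat) :
    (L.foldl pvKeepStep (i, k)).1 = i + L.length := by
  induction L generalizing i k with
  | nil => simp
  | cons a t ih =>
    simp only [List.foldl_cons, pvKeepStep, ih, List.length_cons]
    omega

lemma pvFold_append (L : List (List Int)) (x : List Int) :
    (List.foldl pvKeepStep (0, 0) (L ++ [x])).2 =
      if x ≠ [] then L.length + 1 else (List.foldl pvKeepStep (0, 0) L).2 := by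
  rw [List.foldl_append]
  simp only [List.foldl_cons, List.foldl_nil, pvKeepStep]
  rw [pvFold_fst]
  simp

lemma pvALoop_true (n : Nat) (L : List (List Int)) : pvALoop n L true = L := by
  induction n with
  | zero => rfl
  | succ n ih => simp only [pvALoop]; split <;> simp [ih]

lemma pvFold_le (L : List (List Int)) :
    (List.foldl pvKeepStep (0, 0) L).2 ≤ L.length := by
  induction L using List.reverseRecOn with
  | nil => simp
  | append_singleton t x ih =>
    rw [pvFold_append]
    simp only [List.length_append, List.length_cons, List.length_nil]
    split <;> omega

lemma pvMain (L : List (List Int)) :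
    pvALoop L.length L false = L.take ((List.foldl pvKeepStep (0, 0) L).2) := by
  induction L using List.reverseRecOn with
  | nil => rfl
  | append_singleton t x ih =>
    rw [pvFold_append]
    have hlen : (t ++ [x]).length = t.length + 1 := by simp
    rw [hlen]
    simp only [pvALoop]
    have hget : (t ++ [x])[t.length]?.getD [] = x := by
      simp
    rw [hget]
    by_cases hx : x = []
    · rw [if_pos hx, if_neg (by simp)]
      have hdl : (t ++ [x]).dropLast = t := by simp
      rw [hdl, ih, if_neg (by simp [hx])]
      exact (List.take_append_of_le_length (pvFold_le t)).symm
    · rw [if_neg hx, pvALoop_true, if_pos hx]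
      exact (List.take_of_length_le (by simp)).symm

-- ===== VERDICT (by name: the statement is the Claim_ definition above) =====
theorem remove_empties_py_spec : Claim_equal_remove_empties_py := by
  intro L _
  show remove_empties_py L = remove_empties_py_alt L
  unfold remove_empties_py remove_empties_py_alt
  rw [pvKeepStep_eq]
  exact pvMain L
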